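-- pv_equiv track=rewrite | github.com/awillard1/burp-extensions | id_hash_advanced.py | _englishy
-- ===== SOURCE A (Python) =====
-- PRINTABLE_CHARS = set([ord(c) for c in (
--     "ABCDEFGHIJKLMNOPQRSTUVWXYZabcdefghijklmnopqrstuvwxyz0123456789 .,:;+-/_=!@#$%^&*()[]{}<>?\\|\"'`~\t\r\n"
-- )])
--
-- def _printable_ratio(bs):
--     try:
--         if not bs:
--             return 0.0
--         pr = 0
--         for b in bs:
--             if b in PRINTABLE_CHARS:
--                 pr += 1
--         return float(pr) / float(len(bs))
--     except Exception:
--         return 0.0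
--
-- def _englishy(bs):
--     try:
--         s = ''.join([chr(b) for b in bs])
--     except Exception:
--         return False
--     if not s:
--         return False
--     n = float(len(s))
--     letters = sum([1 for ch in s if ('A' <= ch <= 'Z') or ('a' <= ch <= 'z')])
--     spaces  = s.count(' ')
--     vowels  = sum([1 for ch in s.lower() if ch in 'aeiou'])
--     alpha_ratio = letters / n
--     space_ratio = spaces / n
--     vowel_ratio = (float(vowels) / float(letters)) if letters else 0.0
--     pr = _printable_ratio([ord(c) for c in s])
--     if pr >= 0.9 and (alpha_ratio >= 0.6) and (space_ratio >= 0.02):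
--         return True
--     return False
-- ===== SOURCE B (Python) =====
-- PRINTABLE_CHARS = set([ord(c) for c in (
--     "ABCDEFGHIJKLMNOPQRSTUVWXYZabcdefghijklmnopqrstuvwxyz0123456789 .,:;+-/_=!@#$%^&*()[]{}<>?\\|\"'`~\t\r\n"
-- )])
--
-- def _englishy(bs):
--     # one pass: running counters instead of join + four separate scans
--     n = letters = spaces = printable = 0
--     try:
--         for b in bs:
--             ch = chr(b)
--             n += 1
--             if ('A' <= ch <= 'Z') or ('a' <= ch <= 'z'):
--                 letters += 1
--             if ch == ' ':
--                 spaces += 1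
--             if b in PRINTABLE_CHARS:
--                 printable += 1
--     except Exception:
--         return False
--     if n == 0:
--         return False
--     return (float(printable) / float(n) >= 0.9
--             and letters / float(n) >= 0.6
--             and spaces / float(n) >= 0.02)
-- ===== Notes on version B (the rewrite author's own statement) =====
-- stated objective: simpler
-- what changed: Replaces the join-into-a-string plus four separate scans (letters, spaces, vowels, and the _printable_ratio helper's loop) with a single pass over the bytes maintaining four counters, dropping the dead vowel computation (vowel_ratio is never used).
import Mathlib
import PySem

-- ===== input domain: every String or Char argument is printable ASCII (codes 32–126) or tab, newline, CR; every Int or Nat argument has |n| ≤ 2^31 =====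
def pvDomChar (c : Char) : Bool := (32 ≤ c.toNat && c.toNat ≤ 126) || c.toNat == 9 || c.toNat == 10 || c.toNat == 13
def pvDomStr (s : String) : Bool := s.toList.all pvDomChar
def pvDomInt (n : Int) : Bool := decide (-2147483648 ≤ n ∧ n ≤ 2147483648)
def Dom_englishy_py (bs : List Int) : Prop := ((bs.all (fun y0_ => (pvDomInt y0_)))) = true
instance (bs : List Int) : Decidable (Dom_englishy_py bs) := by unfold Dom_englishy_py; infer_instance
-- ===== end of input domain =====

-- B fuses A's join + four separate scans (and the _printable_ratio helper) into one
-- counting pass and drops the dead vowel computation (vowel_ratio is never used): simpler.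

-- Shared constant of the module: the codes in PRINTABLE_CHARS are exactly
-- {9, 10, 13} ∪ [32, 126] (checked against the Python set literal).
def isPrintableCode (b : Int) : Bool := (32 ≤ b && b ≤ 126) || b == 9 || b == 10 || b == 13

-- chr(b) raises (ValueError/OverflowError) exactly when b < 0 or b > 0x10FFFF.
def chrFails (b : Int) : Bool := b < 0 || 1114111 < b

def isLetterCode (b : Int) : Bool := (65 ≤ b && b ≤ 90) || (97 ≤ b && b ≤ 122)

-- ===== PORT A =====
-- Python's ''.join([chr(b) for b in bs]) keeps the codepoints bs; the char comparisons
-- 'A' <= ch <= 'Z' etc. are codepoint comparisons, so the scans run over bs directly.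
-- The vowel count and vowel_ratio of A are dead code (never read by the condition) and
-- are not ported.  _printable_ratio's loop is the helper below; its float ratio and the
-- float comparisons `pr >= 0.9`, `alpha_ratio >= 0.6`, `space_ratio >= 0.02` are ported
-- as the exact integer comparisons 10*pr ≥ 9*n, 10*letters ≥ 6*n, 50*spaces ≥ n
-- (exact: a rational k/n with n far below 2^26 cannot round across these thresholds).
def printableCount (bs : List Int) : Int :=
  bs.foldl (fun acc b => if isPrintableCode b then acc + 1 else acc) 0

def englishy_py (bs : List Int) : Bool :=
  if bs.any chrFails then false            -- the try/except around the join
  else if bs.length = 0 then false         -- `if not s`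
  else
    let n : Int := bs.length
    let letters : Int := ((bs.filter isLetterCode).length : Int)
    let spaces : Int := ((bs.count 32 : Nat) : Int)
    let pr : Int := printableCount bs
    decide (10 * pr ≥ 9 * n) && decide (10 * letters ≥ 6 * n) && decide (50 * spaces ≥ n)

-- ===== PORT B =====
-- one pass: four running counters; `none` = chr raised mid-loop.
def altLoop : List Int → Int → Int → Int → Int → Option (Int × Int × Int × Int)
  | [], n, l, s, p => some (n, l, s, p)
  | b :: rest, n, l, s, p =>
    if chrFails b then none
    else
      altLoop rest (n + 1)
        (if isLetterCode b then l + 1 else l)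
        (if b == 32 then s + 1 else s)
        (if isPrintableCode b then p + 1 else p)

def englishy_py_alt (bs : List Int) : Bool :=
  match altLoop bs 0 0 0 0 with
  | none => false
  | some (n, letters, spaces, printable) =>
    if n = 0 then false
    else decide (10 * printable ≥ 9 * n) && decide (10 * letters ≥ 6 * n) && decide (50 * spaces ≥ n)

-- ===== PRECONDITION & SPEC =====
def Spec_englishy_py (bs : List Int) (out : Bool) : Prop := out = englishy_py_alt bs
instance (bs : List Int) (out : Bool) : Decidable (Spec_englishy_py bs out) := by unfold Spec_englishy_py; infer_instance

-- ===== CLAIM (what is proved, stated in full; the proofs are below) =====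
def Claim_equal_englishy_py : Prop := ∀ (bs : List Int), Dom_englishy_py bs → Spec_englishy_py bs (englishy_py bs)

-- ===== LEMMAS AND PROOFS =====

theorem printableCount_shift (xs : List Int) (a : Int) :
    xs.foldl (fun acc b => if isPrintableCode b then acc + 1 else acc) a
      = a + xs.foldl (fun acc b => if isPrintableCode b then acc + 1 else acc) 0 := by
  induction xs generalizing a with
  | nil => simp
  | cons x xs ihx =>
    simp only [List.foldl_cons]
    by_cases hx : isPrintableCode x
    · rw [if_pos hx, if_pos hx, ihx (a + 1), ihx (0 + 1)]; ring
    · rw [if_neg hx, if_neg hx, ihx a]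

theorem printableCount_cons (b : Int) (rest : List Int) :
    printableCount (b :: rest) = (if isPrintableCode b then (1:Int) else 0) + printableCount rest := by
  simp only [printableCount, List.foldl_cons]
  by_cases hx : isPrintableCode b
  · rw [if_pos hx, if_pos hx, printableCount_shift rest (0 + 1)]; ring
  · rw [if_neg hx, if_neg hx]; ring

theorem altLoop_eq (bs : List Int) (n l s p : Int) :
    altLoop bs n l s p =
      if bs.any chrFails then none
      else some (n + bs.length, l + ((bs.filter isLetterCode).length : Int),
                 s + ((bs.count 32 : Nat) : Int), p + printableCount bs) := by
  induction bs generalizing n l s p with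
  | nil => simp [altLoop, printableCount]
  | cons b rest ih =>
    simp only [altLoop, List.any_cons]
    by_cases hb : chrFails b
    · simp [hb]
    · rw [if_neg hb, ih]
      simp only [Bool.not_eq_true] at hb
      simp only [hb, Bool.false_or]
      by_cases hr : rest.any chrFails = true
      · simp [hr]
      · rw [if_neg hr, if_neg hr]
        simp only [Option.some.injEq, Prod.mk.injEq]
        refine ⟨?_, ?_, ?_, ?_⟩
        · simp only [List.length_cons]; push_cast; ring
        · simp only [List.filter_cons]
          by_cases hl : isLetterCode b
          · simp only [hl, if_true, List.length_cons]; push_cast; ring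
          · simp [hl]
        · simp only [List.count_cons]
          by_cases hs : (b == 32) = true
          · simp only [hs, if_true]; push_cast; ring
          · simp [hs]
        · rw [printableCount_cons]
          by_cases hp : isPrintableCode b
          · simp only [hp, if_true]; ring
          · simp [hp]

-- ===== VERDICT (by name: the statement is the Claim_ definition above) =====
theorem englishy_py_spec : Claim_equal_englishy_py := by
  intro bs _
  unfold Spec_englishy_py englishy_py englishy_py_alt
  rw [altLoop_eq]
  by_cases hA : bs.any chrFails
  · simp [hA]
  · simp only [hA, Bool.false_eq_true, if_false, zero_add]
    by_cases hlen : bs.length = 0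
    · simp [List.eq_nil_of_length_eq_zero hlen]
    · simp [hlen]
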